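-- pv_equiv track=rewrite | github.com/endere/code-katas | string_pyramid/string_pyramid.py | count_visible_characters_of_the_pyramid
-- ===== SOURCE A (Python) =====
-- def count_visible_characters_of_the_pyramid(characters):
--     """Return the amount of visible stones in the pyramid."""
--     if not isinstance(characters, str):
--         return -1
--     total = 0
--     for i in range(1, len(characters) * 2, 2):
--         if i == 1:
--             total += 1
--         else:
--             total += (i - 2) * 4 + 4
--     if total == 0:
--         return -1
--     return total
-- ===== SOURCE B (Python) =====
-- def count_visible_characters_of_the_pyramid(characters):
--     """Return the amount of visible stones in the pyramid."""
--     if not isinstance(characters, str):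
--         return -1
--     n = len(characters)
--     return 4 * n * (n - 1) + 1 if n else -1
-- ===== Notes on version B (the rewrite author's own statement) =====
-- stated objective: faster
-- what changed: Replaced the O(n) loop summing ring sizes with the closed form 4*n*(n-1)+1 (= (2n-1)^2) for n>=1 and -1 for the empty string.
import Mathlib
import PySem

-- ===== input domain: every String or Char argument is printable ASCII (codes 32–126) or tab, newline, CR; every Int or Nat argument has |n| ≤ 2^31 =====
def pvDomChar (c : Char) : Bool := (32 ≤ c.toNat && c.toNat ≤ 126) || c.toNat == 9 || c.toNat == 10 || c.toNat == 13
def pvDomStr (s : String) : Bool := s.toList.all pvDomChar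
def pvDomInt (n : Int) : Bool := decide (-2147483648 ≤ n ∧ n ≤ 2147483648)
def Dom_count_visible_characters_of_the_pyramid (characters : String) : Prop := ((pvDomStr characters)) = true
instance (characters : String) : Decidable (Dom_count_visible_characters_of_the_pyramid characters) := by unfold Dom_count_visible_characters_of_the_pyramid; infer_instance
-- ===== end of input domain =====

-- B replaces A's O(n) loop over the odd ring sizes with the closed form 4*n*(n-1)+1 (n ≥ 1) / -1 (empty): asymptotically faster.


-- ===== PORT A =====
-- (the `isinstance` guard is vacuously true for a String argument and is omitted)
def count_visible_characters_of_the_pyramid (characters : String) : Int :=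
  let total : Int :=
    (PySem.List.pyRange 1 (PySem.Str.len characters * 2) 2).foldl
      (fun total i => if i = 1 then total + 1 else total + (i - 2) * 4 + 4) 0
  if total = 0 then -1 else total

-- ===== PORT B =====
def count_visible_characters_of_the_pyramid_alt (characters : String) : Int :=
  let n : Int := PySem.Str.len characters
  if n ≠ 0 then 4 * n * (n - 1) + 1 else -1

-- ===== PRECONDITION & SPEC =====
def Spec_count_visible_characters_of_the_pyramid (characters : String) (out : Int) : Prop := out = count_visible_characters_of_the_pyramid_alt characters
instance (characters : String) (out : Int) : Decidable (Spec_count_visible_characters_of_the_pyramid characters out) := by unfold Spec_count_visible_characters_of_the_pyramid; infer_instance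

-- ===== CLAIM (what is proved, stated in full; the proofs are below) =====
def Claim_equal_count_visible_characters_of_the_pyramid : Prop := ∀ (characters : String), Dom_count_visible_characters_of_the_pyramid characters → Spec_count_visible_characters_of_the_pyramid characters (count_visible_characters_of_the_pyramid characters)

-- ===== LEMMAS AND PROOFS =====

-- A's loop over the first n odd numbers sums to (2n-1)² = 4n(n-1)+1 (0 for n = 0).
theorem pyramid_loop_sum (n : Nat) :
    ((List.range n).map (fun k : Nat => (1 : Int) + 2 * k)).foldl
      (fun total i => if i = 1 then total + 1 else total + (i - 2) * 4 + 4) 0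
    = if n = 0 then 0 else 4 * (n : Int) * ((n : Int) - 1) + 1 := by
  induction n with
  | zero => simp
  | succ m ih =>
    rw [List.range_succ, List.map_append, List.foldl_append, ih]
    rcases Nat.eq_zero_or_pos m with hm | hm
    · subst hm; simp
    · have h1 : ¬ ((1 : Int) + 2 * m = 1) := by omega
      simp only [List.map_cons, List.map_nil, List.foldl_cons, List.foldl_nil, if_neg h1]
      have hm0 : ¬ (m = 0) := by omega
      rw [if_neg hm0, if_neg (Nat.succ_ne_zero m)]
      push_cast
      ring

theorem pyramid_range_eq (n : Nat) :
    PySem.List.pyRange 1 ((n : Int) * 2) 2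
      = (List.range n).map (fun k : Nat => (1 : Int) + 2 * k) := by
  rw [PySem.List.pyRange_of_pos 1 ((n : Int) * 2) (by norm_num)]
  rcases Nat.eq_zero_or_pos n with h | h
  · subst h; simp
  · have hlt : (1 : Int) < (n : Int) * 2 := by
      have : (1 : Int) ≤ (n : Int) := by exact_mod_cast h
      omega
    rw [if_pos hlt]
    have : ((n : Int) * 2 - 1 + 2 - 1) / 2 = (n : Int) := by omega
    rw [this]
    simp

-- ===== VERDICT (by name: the statement is the Claim_ definition above) =====
theorem count_visible_characters_of_the_pyramid_spec : Claim_equal_count_visible_characters_of_the_pyramid := by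
  intro s _
  unfold Spec_count_visible_characters_of_the_pyramid
  unfold count_visible_characters_of_the_pyramid count_visible_characters_of_the_pyramid_alt
  have hlen : PySem.Str.len s = (s.toList.length : Int) := rfl
  simp only [hlen, pyramid_range_eq, pyramid_loop_sum]
  rcases Nat.eq_zero_or_pos s.toList.length with h | h
  · simp [h]
  · have hne : ¬ (s.toList.length = 0) := by omega
    have h1 : (1 : Int) ≤ (s.toList.length : Int) := by exact_mod_cast h
    have hnz : (4 : Int) * s.toList.length * ((s.toList.length : Int) - 1) + 1 ≠ 0 := by nlinarith
    simp only [if_neg hne]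
    rw [if_neg hnz, if_pos (by omega : (s.toList.length : Int) ≠ 0)]
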